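-- pv_equiv track=rewrite | github.com/roel-heremans/Human-Design | ocr/bodygraph_ocr.py | _verify_anchor_sequence
-- ===== SOURCE A (Python) =====
-- from typing import Dict, List, Tuple, Optional
--
-- def _verify_anchor_sequence(all_numbers: List[str], start_pos: int, known_anchors: List[Tuple[str, str]]) -> bool:
--     """Verify that the sequence starting at start_pos matches the known anchors"""
--
--     for i, (expected_red, expected_black) in enumerate(known_anchors):
--         pos = start_pos + (i * 2)
--         if pos + 1 >= len(all_numbers):
--             return False
--
--         if all_numbers[pos] != expected_red or all_numbers[pos + 1] != expected_black:
--             return False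
--
--     return True
-- ===== SOURCE B (Python) =====
-- from typing import List, Tuple
--
-- def _verify_anchor_sequence(all_numbers: List[str], start_pos: int, known_anchors: List[Tuple[str, str]]) -> bool:
--     """Verify that the sequence starting at start_pos matches the known anchors"""
--     if not known_anchors:
--         return True
--     expected = [x for pair in known_anchors for x in pair]
--     end = start_pos + len(expected)
--     return 0 <= start_pos and end <= len(all_numbers) and all_numbers[start_pos:end] == expected
-- ===== Notes on version B (the rewrite author's own statement) =====
-- stated objective: simpler
-- what changed: Replaces the strided per-pair loop with manual index arithmetic by building the flattened expected list once and comparing it with a single slice after a bounds check (plus a trivial early return for no anchors).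
-- intended difference: For negative start_pos (with anchors present and -len <= start_pos) where the elements at Python's wrapped-around negative indices happen to match the anchors, A returns True via accidental negative-index wraparound while B returns False, which is intended since a match position in the OCR number list cannot be negative. — e.g. on _verify_anchor_sequence(["7"], -1, [("7", "7")]): A returns true, B returns false
import Mathlib
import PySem

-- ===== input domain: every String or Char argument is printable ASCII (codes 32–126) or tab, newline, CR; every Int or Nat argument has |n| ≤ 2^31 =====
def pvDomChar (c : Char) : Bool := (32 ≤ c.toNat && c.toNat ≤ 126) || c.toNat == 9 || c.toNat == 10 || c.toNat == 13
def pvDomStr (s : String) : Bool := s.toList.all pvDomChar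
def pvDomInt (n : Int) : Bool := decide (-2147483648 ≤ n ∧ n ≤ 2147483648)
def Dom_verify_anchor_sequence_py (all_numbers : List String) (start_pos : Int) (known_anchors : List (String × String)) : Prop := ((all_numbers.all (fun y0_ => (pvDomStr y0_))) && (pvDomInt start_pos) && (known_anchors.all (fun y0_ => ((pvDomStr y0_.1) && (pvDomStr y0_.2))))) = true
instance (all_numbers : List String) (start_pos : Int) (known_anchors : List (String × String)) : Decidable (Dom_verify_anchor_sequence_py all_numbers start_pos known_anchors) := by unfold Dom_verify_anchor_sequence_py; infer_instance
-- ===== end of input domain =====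

-- B replaces A's strided per-pair loop by one slice comparison against the flattened
-- expected list (objective: simpler); A's negative-index wraparound acceptances are
-- declared as an intended difference (D_) and its IndexError inputs are outside Pre_.

-- ===== PORT A =====
-- the for-loop with early returns, as structural recursion over the anchors carrying the index i
def pvGoA (all_numbers : List String) (start_pos : Int) : List (String × String) → Int → Bool
  | [], _ => true
  | (expected_red, expected_black) :: rest, i =>
    let pos := start_pos + i * 2
    if (all_numbers.length : Int) ≤ pos + 1 then false
    else if PySem.List.pyGetD all_numbers pos "" ≠ expected_red ∨
            PySem.List.pyGetD all_numbers (pos + 1) "" ≠ expected_black then false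
    else pvGoA all_numbers start_pos rest (i + 1)

def verify_anchor_sequence_py (all_numbers : List String) (start_pos : Int) (known_anchors : List (String × String)) : Bool :=
  pvGoA all_numbers start_pos known_anchors 0

-- ===== PORT B =====
def verify_anchor_sequence_py_alt (all_numbers : List String) (start_pos : Int) (known_anchors : List (String × String)) : Bool :=
  if known_anchors = [] then true
  else
    let expected := known_anchors.flatMap (fun pair => [pair.1, pair.2])
    let e := start_pos + (expected.length : Int)
    decide (0 ≤ start_pos) && decide (e ≤ (all_numbers.length : Int)) &&
      (PySem.List.slice all_numbers (some start_pos) (some e) == expected)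

-- ===== PRECONDITION & SPEC =====
-- Pre_ excludes exactly the inputs where A raises IndexError: nonempty anchors with
-- start_pos < -len(all_numbers) while the first bounds check passes (start_pos + 1 < len).
def Pre_verify_anchor_sequence_py (all_numbers : List String) (start_pos : Int) (known_anchors : List (String × String)) : Prop :=
  known_anchors ≠ [] → (0 ≤ start_pos + (all_numbers.length : Int) ∨ (all_numbers.length : Int) ≤ start_pos + 1)
instance (all_numbers : List String) (start_pos : Int) (known_anchors : List (String × String)) : Decidable (Pre_verify_anchor_sequence_py all_numbers start_pos known_anchors) := by unfold Pre_verify_anchor_sequence_py; infer_instance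

def pvWitness_verify_anchor_sequence_py : List String × Int × (List (String × String)) := (["12", "34"], 0, [("12", "34")])

-- Negative start_pos (with anchors present, -len ≤ start_pos) where the elements at Python's
-- wrapped-around negative indices match the anchors: A returns True by accidental negative-index
-- wraparound, B returns False, which is intended since a match position cannot be negative.
def D_verify_anchor_sequence_py (all_numbers : List String) (start_pos : Int) (known_anchors : List (String × String)) : Prop :=
  start_pos < 0 ∧ known_anchors ≠ [] ∧ 0 ≤ start_pos + (all_numbers.length : Int) ∧
    ∀ j : ℕ, ∀ hj : j < known_anchors.length,
      start_pos + 2 * (j : Int) + 1 < (all_numbers.length : Int) ∧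
      PySem.List.pyGet? all_numbers (start_pos + 2 * (j : Int)) = some (known_anchors[j].1) ∧
      PySem.List.pyGet? all_numbers (start_pos + 2 * (j : Int) + 1) = some (known_anchors[j].2)
instance (all_numbers : List String) (start_pos : Int) (known_anchors : List (String × String)) : Decidable (D_verify_anchor_sequence_py all_numbers start_pos known_anchors) := by unfold D_verify_anchor_sequence_py; infer_instance

def Spec_verify_anchor_sequence_py (all_numbers : List String) (start_pos : Int) (known_anchors : List (String × String)) (out : Bool) : Prop := ¬ D_verify_anchor_sequence_py all_numbers start_pos known_anchors → out = verify_anchor_sequence_py_alt all_numbers start_pos known_anchors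
instance (all_numbers : List String) (start_pos : Int) (known_anchors : List (String × String)) (out : Bool) : Decidable (Spec_verify_anchor_sequence_py all_numbers start_pos known_anchors out) := by unfold Spec_verify_anchor_sequence_py; infer_instance

def pvDiffWitness_verify_anchor_sequence_py : List String × Int × (List (String × String)) := (["7"], -1, [("7", "7")])
def pvDiffWitnessOut_verify_anchor_sequence_py : Bool × Bool := (true, false)

-- ===== CLAIM (what is proved, stated in full; the proofs are below) =====
def Claim_unchanged_verify_anchor_sequence_py : Prop := ∀ (all_numbers : List String) (start_pos : Int) (known_anchors : List (String × String)), Dom_verify_anchor_sequence_py all_numbers start_pos known_anchors → Pre_verify_anchor_sequence_py all_numbers start_pos known_anchors → Spec_verify_anchor_sequence_py all_numbers start_pos known_anchors (verify_anchor_sequence_py all_numbers start_pos known_anchors)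
def Claim_changed_verify_anchor_sequence_py : Prop := Dom_verify_anchor_sequence_py (pvDiffWitness_verify_anchor_sequence_py.1) (pvDiffWitness_verify_anchor_sequence_py.2.1) (pvDiffWitness_verify_anchor_sequence_py.2.2) ∧ Pre_verify_anchor_sequence_py (pvDiffWitness_verify_anchor_sequence_py.1) (pvDiffWitness_verify_anchor_sequence_py.2.1) (pvDiffWitness_verify_anchor_sequence_py.2.2) ∧ D_verify_anchor_sequence_py (pvDiffWitness_verify_anchor_sequence_py.1) (pvDiffWitness_verify_anchor_sequence_py.2.1) (pvDiffWitness_verify_anchor_sequence_py.2.2) ∧ verify_anchor_sequence_py (pvDiffWitness_verify_anchor_sequence_py.1) (pvDiffWitness_verify_anchor_sequence_py.2.1) (pvDiffWitness_verify_anchor_sequence_py.2.2) = pvDiffWitnessOut_verify_anchor_sequence_py.1 ∧ verify_anchor_sequence_py_alt (pvDiffWitness_verify_anchor_sequence_py.1) (pvDiffWitness_verify_anchor_sequence_py.2.1) (pvDiffWitness_verify_anchor_sequence_py.2.2) = pvDiffWitnessOut_verify_anchor_sequence_py.2 ∧ pvDiffWitnessOut_verify_anchor_sequence_py.1 ≠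 pvDiffWitnessOut_verify_anchor_sequence_py.2
def Claim_exact_verify_anchor_sequence_py : Prop := ∀ (all_numbers : List String) (start_pos : Int) (known_anchors : List (String × String)), Dom_verify_anchor_sequence_py all_numbers start_pos known_anchors → Pre_verify_anchor_sequence_py all_numbers start_pos known_anchors → D_verify_anchor_sequence_py all_numbers start_pos known_anchors → verify_anchor_sequence_py all_numbers start_pos known_anchors ≠ verify_anchor_sequence_py_alt all_numbers start_pos known_anchors

-- ===== LEMMAS AND PROOFS =====

theorem pv_pyGetD_of_pyGet?_some {α : Type} [Inhabited α] (xs : List α) (i : Int) (d v : α)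
    (h : PySem.List.pyGet? xs i = some v) : PySem.List.pyGetD xs i d = v := by
  simp [PySem.List.pyGetD, h]

theorem pv_pyGet?_some_of_range {α : Type} [Inhabited α] (xs : List α) (i : Int) (d : α)
    (h1 : -(xs.length : Int) ≤ i) (h2 : i < (xs.length : Int)) :
    PySem.List.pyGet? xs i = some (PySem.List.pyGetD xs i d) := by
  cases hv : PySem.List.pyGet? xs i with
  | none =>
      rw [PySem.List.pyGet?_eq_none_iff] at hv
      exact absurd (by constructor <;> omega : PySem.Raise.InRange xs.length i) hv
  | some v => rw [pv_pyGetD_of_pyGet?_some xs i d v hv]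

-- characterisation of A's loop, for any index base not below -len
theorem pvGoA_true_iff (xs : List String) (sp : Int) (l : List (String × String)) :
    ∀ i : Int, 0 ≤ i → -(xs.length : Int) ≤ sp + i * 2 →
    (pvGoA xs sp l i = true ↔
      ∀ j : ℕ, ∀ hj : j < l.length,
        sp + i * 2 + 2 * (j : Int) + 1 < (xs.length : Int) ∧
        PySem.List.pyGet? xs (sp + i * 2 + 2 * (j : Int)) = some (l[j].1) ∧
        PySem.List.pyGet? xs (sp + i * 2 + 2 * (j : Int) + 1) = some (l[j].2)) := by
  induction l with
  | nil => intro i hi hbase; simp [pvGoA]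
  | cons hd rest ih =>
    intro i hi hbase
    obtain ⟨er, eb⟩ := hd
    show (if (xs.length : Int) ≤ (sp + i * 2) + 1 then false
          else if PySem.List.pyGetD xs (sp + i * 2) "" ≠ er ∨
                  PySem.List.pyGetD xs ((sp + i * 2) + 1) "" ≠ eb then false
          else pvGoA xs sp rest (i + 1)) = true ↔ _
    split_ifs with h1 h2
    · simp only [Bool.false_eq_true, false_iff]
      intro hall
      have h0 := hall 0 (by simp)
      push_cast at h0; omega
    · simp only [Bool.false_eq_true, false_iff]
      intro hall
      have h0 := hall 0 (by simp)
      push_cast at h0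
      obtain ⟨hb, hr, hbk⟩ := h0
      simp only [List.getElem_cons_zero, mul_zero, add_zero] at hr hbk
      rcases h2 with h2 | h2
      · exact h2 (pv_pyGetD_of_pyGet?_some xs _ "" er (by convert hr using 2; try ring))
      · exact h2 (pv_pyGetD_of_pyGet?_some xs _ "" eb (by convert hbk using 2; try ring))
    · push_neg at h1 h2
      obtain ⟨her, heb⟩ := h2
      have hbase' : -(xs.length : Int) ≤ sp + (i + 1) * 2 := by omega
      rw [ih (i + 1) (by omega) hbase']
      constructor
      · intro hrest j hj
        match j, hj with
        | 0, _ =>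
          refine ⟨by push_cast; omega, ?_, ?_⟩
          · rw [show sp + i * 2 + 2 * ((0:ℕ) : Int) = sp + i * 2 by push_cast; ring]
            rw [pv_pyGet?_some_of_range xs _ "" (by omega) (by omega), her]
            simp
          · rw [show sp + i * 2 + 2 * ((0:ℕ) : Int) + 1 = sp + i * 2 + 1 by push_cast; ring]
            rw [pv_pyGet?_some_of_range xs _ "" (by omega) (by omega), heb]
            simp
        | j + 1, hj =>
          have hthis := hrest j (by simpa using Nat.lt_of_succ_lt_succ hj)
          simp only [List.getElem_cons_succ]
          refine ⟨?_, ?_, ?_⟩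
          · have := hthis.1; push_cast at this ⊢; omega
          · rw [show sp + i * 2 + 2 * ((j + 1 : ℕ) : Int) = sp + (i + 1) * 2 + 2 * (j : Int) by push_cast; ring]
            exact hthis.2.1
          · rw [show sp + i * 2 + 2 * ((j + 1 : ℕ) : Int) + 1 = sp + (i + 1) * 2 + 2 * (j : Int) + 1 by push_cast; ring]
            exact hthis.2.2
      · intro hall j hj
        have hthis := hall (j + 1) (by simpa using Nat.succ_lt_succ hj)
        simp only [List.getElem_cons_succ] at hthis
        refine ⟨?_, ?_, ?_⟩
        · have := hthis.1; push_cast at this ⊢; omega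
        · rw [show sp + (i + 1) * 2 + 2 * (j : Int) = sp + i * 2 + 2 * ((j + 1 : ℕ) : Int) by push_cast; ring]
          exact hthis.2.1
        · rw [show sp + (i + 1) * 2 + 2 * (j : Int) + 1 = sp + i * 2 + 2 * ((j + 1 : ℕ) : Int) + 1 by push_cast; ring]
          exact hthis.2.2

-- the i = 0 corollary, positions sp + 2j
theorem pvGoA0_iff (xs : List String) (sp : Int) (l : List (String × String))
    (hbase : -(xs.length : Int) ≤ sp) :
    (pvGoA xs sp l 0 = true ↔
      ∀ j : ℕ, ∀ hj : j < l.length,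
        sp + 2 * (j : Int) + 1 < (xs.length : Int) ∧
        PySem.List.pyGet? xs (sp + 2 * (j : Int)) = some (l[j].1) ∧
        PySem.List.pyGet? xs (sp + 2 * (j : Int) + 1) = some (l[j].2)) := by
  have := pvGoA_true_iff xs sp l 0 le_rfl (by omega)
  simpa using this

theorem pv_flat_length (l : List (String × String)) :
    (l.flatMap (fun pair => [pair.1, pair.2])).length = 2 * l.length := by
  induction l with
  | nil => simp
  | cons hd tl ih => simp [ih]; omega

-- the drop/take slice comparison, element-wise (all in ℕ)
theorem pv_dt_iff (xs : List String) (l : List (String × String)) :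
    ∀ s : ℕ,
    (s + 2 * l.length ≤ xs.length ∧
      (xs.drop s).take (2 * l.length) = l.flatMap (fun pair => [pair.1, pair.2])) ↔
    (s ≤ xs.length ∧ ∀ j : ℕ, ∀ hj : j < l.length,
      s + 2 * j + 1 < xs.length ∧ xs[s + 2 * j]? = some (l[j].1) ∧
      xs[s + 2 * j + 1]? = some (l[j].2)) := by
  induction l with
  | nil =>
    intro s
    constructor
    · rintro ⟨h, -⟩
      refine ⟨by simpa using h, ?_⟩
      intro j hj
      simp at hj
    · rintro ⟨h, -⟩
      exact ⟨by simpa using h, by simp⟩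
  | cons hd rest ih =>
    intro s
    obtain ⟨er, eb⟩ := hd
    constructor
    · rintro ⟨hlen, heq⟩
      have hs1 : s + 1 < xs.length := by simp at hlen ⊢; omega
      have hs : s < xs.length := by omega
      rw [List.drop_eq_getElem_cons hs, List.drop_eq_getElem_cons hs1] at heq
      rw [show s + 1 + 1 = s + 2 from rfl] at heq
      rw [show 2 * ((er, eb) :: rest).length = (2 * rest.length) + 1 + 1 by simp; ring] at heq
      simp only [List.take_succ_cons, List.flatMap_cons, List.cons_append, List.cons.injEq,
        List.nil_append] at heq
      obtain ⟨her, heb, hrest⟩ := heq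
      have hih := (ih (s + 2)).1 ⟨by simp at hlen ⊢; omega, hrest⟩
      refine ⟨by omega, ?_⟩
      intro j hj
      match j, hj with
      | 0, _ =>
        simp only [List.getElem_cons_zero, Nat.mul_zero, Nat.add_zero]
        exact ⟨hs1, by rw [List.getElem?_eq_getElem hs, her], by rw [List.getElem?_eq_getElem hs1, heb]⟩
      | j + 1, hj =>
        have := hih.2 j (by simpa using Nat.lt_of_succ_lt_succ hj)
        simp only [List.getElem_cons_succ]
        refine ⟨by omega, ?_, ?_⟩
        · rw [show s + 2 * (j + 1) = s + 2 + 2 * j by ring]; exact this.2.1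
        · rw [show s + 2 * (j + 1) + 1 = s + 2 + 2 * j + 1 by ring]; exact this.2.2
    · rintro ⟨hsle, hall⟩
      have h0 := hall 0 (by simp)
      simp only [List.getElem_cons_zero, Nat.mul_zero, Nat.add_zero] at h0
      obtain ⟨hs1, her?, heb?⟩ := h0
      have hs : s < xs.length := by omega
      have hrest := (ih (s + 2)).2 ⟨by omega, by
        intro j hj
        have := hall (j + 1) (by simpa using Nat.succ_lt_succ hj)
        simp only [List.getElem_cons_succ] at this
        refine ⟨by omega, ?_, ?_⟩
        · rw [show s + 2 + 2 * j = s + 2 * (j + 1) by ring]; exact this.2.1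
        · rw [show s + 2 + 2 * j + 1 = s + 2 * (j + 1) + 1 by ring]; exact this.2.2⟩
      refine ⟨by simp; omega, ?_⟩
      rw [List.drop_eq_getElem_cons hs, List.drop_eq_getElem_cons hs1]
      rw [show s + 1 + 1 = s + 2 from rfl]
      rw [show 2 * ((er, eb) :: rest).length = (2 * rest.length) + 1 + 1 by simp; ring]
      simp only [List.take_succ_cons, List.flatMap_cons, List.cons_append, List.nil_append,
        List.cons.injEq]
      rw [List.getElem?_eq_getElem hs] at her?
      rw [List.getElem?_eq_getElem hs1] at heb?
      exact ⟨by injection her?, by injection heb?, hrest.2⟩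

-- characterisation of B for a nonnegative start, same shape as pvGoA0_iff
theorem pvAlt_iff (xs : List String) (s : ℕ) (l : List (String × String)) (hl : l ≠ []) :
    (verify_anchor_sequence_py_alt xs (s : Int) l = true ↔
      ∀ j : ℕ, ∀ hj : j < l.length,
        (s : Int) + 2 * (j : Int) + 1 < (xs.length : Int) ∧
        PySem.List.pyGet? xs ((s : Int) + 2 * (j : Int)) = some (l[j].1) ∧
        PySem.List.pyGet? xs ((s : Int) + 2 * (j : Int) + 1) = some (l[j].2)) := by
  unfold verify_anchor_sequence_py_alt
  rw [if_neg hl]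
  have hflat := pv_flat_length l
  show (decide (0 ≤ (s : Int)) &&
        decide ((s : Int) + ((l.flatMap (fun pair => [pair.1, pair.2])).length : Int) ≤ (xs.length : Int)) &&
        (PySem.List.slice xs (some (s : Int))
          (some ((s : Int) + ((l.flatMap (fun pair => [pair.1, pair.2])).length : Int)))
          == l.flatMap (fun pair => [pair.1, pair.2]))) = true ↔ _
  rw [show ((s : Int) + ((l.flatMap (fun pair => [pair.1, pair.2])).length : Int))
        = ((s : Int) + ((2 * l.length : ℕ) : Int)) by rw [hflat]]
  rw [PySem.List.slice_natCast_add]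
  simp only [Bool.and_eq_true, decide_eq_true_eq, beq_iff_eq, hflat]
  constructor
  · rintro ⟨⟨-, hle⟩, heq⟩
    have := (pv_dt_iff xs l s).1 ⟨by exact_mod_cast hle, heq⟩
    intro j hj
    obtain ⟨hb, h1, h2⟩ := this.2 j hj
    refine ⟨by push_cast; omega, ?_, ?_⟩
    · rw [show (s : Int) + 2 * (j : Int) = ((s + 2 * j : ℕ) : Int) by push_cast; ring,
        PySem.List.pyGet?_natCast, h1]
    · rw [show (s : Int) + 2 * (j : Int) + 1 = ((s + 2 * j + 1 : ℕ) : Int) by push_cast; ring,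
        PySem.List.pyGet?_natCast, h2]
  · intro hall
    have hnat : ∀ j : ℕ, ∀ hj : j < l.length,
        s + 2 * j + 1 < xs.length ∧ xs[s + 2 * j]? = some (l[j].1) ∧
        xs[s + 2 * j + 1]? = some (l[j].2) := by
      intro j hj
      obtain ⟨hb, h1, h2⟩ := hall j hj
      refine ⟨by push_cast at hb; omega, ?_, ?_⟩
      · rw [show (s : Int) + 2 * (j : Int) = ((s + 2 * j : ℕ) : Int) by push_cast; ring,
          PySem.List.pyGet?_natCast] at h1
        exact h1
      · rw [show (s : Int) + 2 * (j : Int) + 1 = ((s + 2 * j + 1 : ℕ) : Int) by push_cast; ring,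
          PySem.List.pyGet?_natCast] at h2
        exact h2
    have hs_le : s ≤ xs.length := by
      obtain ⟨p, rest, rfl⟩ := List.exists_cons_of_ne_nil hl
      have := hnat 0 (by simp)
      omega
    have := (pv_dt_iff xs l s).2 ⟨hs_le, hnat⟩
    exact ⟨⟨by omega, by exact_mod_cast this.1⟩, this.2⟩

theorem pvAlt_neg_false (xs : List String) (sp : Int) (l : List (String × String))
    (hl : l ≠ []) (hsp : sp < 0) : verify_anchor_sequence_py_alt xs sp l = false := by
  unfold verify_anchor_sequence_py_alt
  rw [if_neg hl]
  have : ¬ (0 ≤ sp) := by omega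
  simp [this]

-- ===== VERDICT (by name: the statement is the Claim_ definition above) =====
theorem verify_anchor_sequence_py_spec : Claim_unchanged_verify_anchor_sequence_py := by
  intro xs sp l _hdom hpre hnD
  by_cases hl : l = []
  · subst hl
    simp [verify_anchor_sequence_py, pvGoA, verify_anchor_sequence_py_alt]
  by_cases hsp : 0 ≤ sp
  · obtain ⟨s, rfl⟩ := Int.eq_ofNat_of_zero_le hsp
    rw [Bool.eq_iff_iff]
    rw [show verify_anchor_sequence_py xs (s : Int) l = pvGoA xs (s : Int) l 0 from rfl]
    rw [pvGoA0_iff xs (s : Int) l (by omega)]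
    exact (pvAlt_iff xs s l hl).symm
  · push_neg at hsp
    rw [pvAlt_neg_false xs sp l hl hsp]
    by_cases hbase : -(xs.length : Int) ≤ sp
    · cases hA : verify_anchor_sequence_py xs sp l with
      | false => rfl
      | true =>
        exfalso
        apply hnD
        refine ⟨hsp, hl, by omega, ?_⟩
        exact (pvGoA0_iff xs sp l hbase).1 hA
    · push_neg at hbase
      have hpre' := hpre hl
      have hge : (xs.length : Int) ≤ sp + 1 := by omega
      obtain ⟨⟨er, eb⟩, rest, rfl⟩ := List.exists_cons_of_ne_nil hl
      show (if (xs.length : Int) ≤ (sp + 0 * 2) + 1 then false else _) = false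
      rw [if_pos (by omega)]

theorem verify_anchor_sequence_py_changed : Claim_changed_verify_anchor_sequence_py := by
  unfold Claim_changed_verify_anchor_sequence_py; decide

theorem verify_anchor_sequence_py_tight : Claim_exact_verify_anchor_sequence_py := by
  intro xs sp l _hdom _hpre hD
  obtain ⟨hsp, hl, hlen, hall⟩ := hD
  have hA : verify_anchor_sequence_py xs sp l = true :=
    (pvGoA0_iff xs sp l (by omega)).2 hall
  rw [hA, pvAlt_neg_false xs sp l hl hsp]
  decide
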